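-- pv_equiv track=rewrite | github.com/hanukathas/CodingRevisions | revisions/array/count_candy_flavors.py | count_candy_flavors
-- ===== SOURCE A (Python) =====
-- from collections import Counter
--
-- def count_candy_flavors(candies: list, k: int):
--     """
--     https://www.notion.so/karthikrajagopalan/Chime-1cae4932e4f180329656d5d2a5af0532?pvs=4#1f3e4932e4f1809eb8d2f842082e406c
--     :param candies:
--     :param k:
--     :return:
--     """
--     n = len(candies)
--     total_freq = Counter(candies)
--     window = candies[:k]
--     window_freq = Counter(window)
--     # after initial division
--     for flavor, candy in window_freq.items():
--         total_freq[flavor] -= candy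
--     # max unique flavors
--     max_unique = sum(1 for count in total_freq.values() if count > 0)
--
--     for i in range(1, n-k+1):
--         # remove left most element (give the candy)
--         flavor = candies[i - 1]
--         window_freq[flavor] -= 1
--         total_freq[flavor] += 1
--
--         # add kth (add a candy)
--         flavor = candies[i + k - 1]
--         window_freq[flavor] += 1
--         total_freq[flavor] -= 1
--
--         unique = sum(1 for count in total_freq.values() if count > 0)
--         max_unique = max(max_unique, unique)
--     return max_unique
-- ===== SOURCE B (Python) =====
-- def count_candy_flavors(candies: list, k: int):
--     # The candies remaining at window start i are candies[:i] + candies[i+k:];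
--     # take the best distinct count over all window starts.
--     n = len(candies)
--     best = 0
--     for i in range(max(0, n - k) + 1):
--         best = max(best, len(set(candies[:i] + candies[i + k:])))
--     return best
-- ===== Notes on version B (the rewrite author's own statement) =====
-- stated objective: simpler
-- what changed: B drops A's Counter bookkeeping entirely: for each window start i it takes len(set(candies[:i] + candies[i+k:])) directly, replacing the stateful frequency-dict slide by a stateless slice-and-set per position.
import Mathlib
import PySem

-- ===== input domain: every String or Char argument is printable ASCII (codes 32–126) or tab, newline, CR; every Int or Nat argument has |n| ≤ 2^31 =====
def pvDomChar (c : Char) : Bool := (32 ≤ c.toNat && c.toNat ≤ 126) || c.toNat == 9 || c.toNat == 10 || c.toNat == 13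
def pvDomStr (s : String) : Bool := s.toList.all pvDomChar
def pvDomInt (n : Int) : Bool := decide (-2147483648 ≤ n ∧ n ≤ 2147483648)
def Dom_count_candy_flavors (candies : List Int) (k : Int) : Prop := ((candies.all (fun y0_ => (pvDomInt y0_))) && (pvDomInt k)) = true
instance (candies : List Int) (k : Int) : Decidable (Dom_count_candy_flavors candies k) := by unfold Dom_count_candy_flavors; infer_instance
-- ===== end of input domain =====

-- B replaces A's stateful Counter slide by a stateless per-position computation:
-- the candies remaining at window start i are candies[:i] + candies[i+k:], and B
-- maximises len(set(...)) over the starts (objective: simpler).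

-- ===== PORT A =====
-- Port of A. Counter -> PySem.Dict Int Int; 'd[x] -= v' -> Dict.modify x 0 (· - v).
-- candies[i-1] / candies[i+k-1] -> pyGetD … 0: exact under Pre_ (0 ≤ k), which keeps
-- every index the loop touches in range (Python raises IndexError exactly when k < 0).
-- A-side helper: 'sum(1 for count in total_freq.values() if count > 0)'.
def pvCountPos (d : PySem.Dict Int Int) : Int :=
  d.values.foldl (fun s c => if 0 < c then s + 1 else s) 0

-- A-side helper: the body of A's slide loop.
def pvStepA (candies : List Int) (k : Int)
    (st : PySem.Dict Int Int × PySem.Dict Int Int × Int) (i : Int) :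
    PySem.Dict Int Int × PySem.Dict Int Int × Int :=
  let flavor := PySem.List.pyGetD candies (i - 1) 0
  let wf := st.1.modify flavor 0 (· - 1)
  let tf := st.2.1.modify flavor 0 (· + 1)
  let flavor2 := PySem.List.pyGetD candies (i + k - 1) 0
  let wf := wf.modify flavor2 0 (· + 1)
  let tf := tf.modify flavor2 0 (· - 1)
  let unique := pvCountPos tf
  (wf, tf, max st.2.2 unique)

def count_candy_flavors (candies : List Int) (k : Int) : Int :=
  let n : Int := candies.length
  let total_freq := PySem.Dict.counter candies
  let window := PySem.List.slice candies none (some k)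
  let window_freq := PySem.Dict.counter window
  let total_freq := window_freq.items.foldl
    (fun d p => d.modify p.1 0 (· - p.2)) total_freq
  let max_unique := pvCountPos total_freq
  ((PySem.List.pyRange 1 (n - k + 1) 1).foldl (pvStepA candies k)
    (window_freq, total_freq, max_unique)).2.2

-- ===== PORT B =====
-- Port of Source B: 'for i in range(max(0, n-k)+1)' -> foldl over pyRange;
-- candies[:i] + candies[i+k:] -> slice ++ slice; set(...) -> PySem.Set.ofList.
def count_candy_flavors_alt (candies : List Int) (k : Int) : Int :=
  let n : Int := candies.length
  (PySem.List.pyRange 0 (max 0 (n - k) + 1) 1).foldl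
    (fun best i =>
      max best ((PySem.Set.ofList
        (PySem.List.slice candies none (some i) ++
         PySem.List.slice candies (some (i + k)) none)).length : Int))
    0

-- ===== PRECONDITION & SPEC =====
-- Pre_ excludes exactly k < 0, where Python A raises IndexError (its slide loop
-- then runs past the end of the list).
def Pre_count_candy_flavors (candies : List Int) (k : Int) : Prop := 0 ≤ k
instance (candies : List Int) (k : Int) : Decidable (Pre_count_candy_flavors candies k) := by unfold Pre_count_candy_flavors; infer_instance
def pvWitness_count_candy_flavors : List Int × Int := ([1, 2, 2, 3], 2)

def Spec_count_candy_flavors (candies : List Int) (k : Int) (out : Int) : Prop := out = count_candy_flavors_alt candies k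
instance (candies : List Int) (k : Int) (out : Int) : Decidable (Spec_count_candy_flavors candies k out) := by unfold Spec_count_candy_flavors; infer_instance

-- ===== CLAIM (what is proved, stated in full; the proofs are below) =====
def Claim_equal_count_candy_flavors : Prop := ∀ (candies : List Int) (k : Int), Dom_count_candy_flavors candies k → Pre_count_candy_flavors candies k → Spec_count_candy_flavors candies k (count_candy_flavors candies k)

-- ===== LEMMAS AND PROOFS =====

-- the candies left over at window start i (proof-side view of both programs)
def pvRest (candies : List Int) (kk i : Nat) : List Int :=
  candies.take i ++ candies.drop (i + kk)

-- the distinct count of the leftover candies at start i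
def pvF (candies : List Int) (kk i : Nat) : Int :=
  ((PySem.Set.ofList (pvRest candies kk i)).length : Int)

theorem pvCountPos_eq (d : PySem.Dict Int Int) :
    pvCountPos d = ((d.values.countP (fun c => decide (0 < c)) : Nat) : Int) := by
  unfold pvCountPos
  rw [PySem.List.foldl_ite_add_one (p := fun c => 0 < c)]
  simp

theorem pvMem_rest (candies : List Int) (kk i : Nat) (v : Int)
    (h : v ∈ pvRest candies kk i) : v ∈ candies := by
  rcases List.mem_append.mp h with h | h
  · exact List.mem_of_mem_take h
  · exact List.mem_of_mem_drop h

-- 'number of positive counts' = 'distinct count of the leftover list'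
theorem pvCountPos_of_inv (candies : List Int) (kk i : Nat) (tf : PySem.Dict Int Int)
    (hkeys : tf.keys = PySem.Set.ofList candies)
    (hg : ∀ v, tf.getD v 0 = ((pvRest candies kk i).count v : Int)) :
    pvCountPos tf = pvF candies kk i := by
  have hnd : tf.keys.Nodup := by rw [hkeys]; exact PySem.Set.nodup_ofList candies
  rw [pvCountPos_eq, PySem.Dict.values_eq_map_keys tf hnd 0, hkeys, List.countP_map]
  have hcong : (PySem.Set.ofList candies).countP
        ((fun c => decide (0 < c)) ∘ fun k => tf.getD k 0)
      = (PySem.Set.ofList candies).countP (fun v => decide (v ∈ pvRest candies kk i)) := by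
    apply List.countP_congr
    intro v _
    simp only [Function.comp, hg v]
    simp only [decide_eq_true_eq]
    constructor
    · intro h
      exact List.count_pos_iff.mp (by exact_mod_cast h)
    · intro h
      exact_mod_cast List.count_pos_iff.mpr h
  rw [hcong, List.countP_eq_length_filter]
  unfold pvF
  congr 1
  have hndf : ((PySem.Set.ofList candies).filter
      (fun v => decide (v ∈ pvRest candies kk i))).Nodup :=
    (PySem.Set.nodup_ofList candies).filter _
  have hnds : (PySem.Set.ofList (pvRest candies kk i)).Nodup :=
    PySem.Set.nodup_ofList _
  rw [← List.toFinset_card_of_nodup hndf, ← List.toFinset_card_of_nodup hnds]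
  congr 1
  ext v
  simp only [List.mem_toFinset, List.mem_filter, PySem.Set.mem_ofList, decide_eq_true_eq]
  exact ⟨fun h => h.2, fun h => ⟨pvMem_rest _ _ _ _ h, h⟩⟩

theorem pvUpdate_of_subset (s : List Int) (l : List Int) (h : ∀ x ∈ l, x ∈ s) :
    PySem.Set.update s l = s := by
  induction l generalizing s with
  | nil => rfl
  | cons a t ih =>
    rw [PySem.Set.update_cons, PySem.Set.add_of_mem (h a List.mem_cons_self)]
    exact ih s (fun x hx => h x (List.mem_cons_of_mem _ hx))

-- getD after B's element-by-element subtraction of the window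
theorem pvGetD_sub_fold (l : List Int) (d : PySem.Dict Int Int) (v : Int) :
    (l.foldl (fun d c => d.modify c 0 (· - 1)) d).getD v 0
      = d.getD v 0 - l.count v := by
  induction l generalizing d with
  | nil => simp
  | cons a t ih =>
    simp only [List.foldl_cons, ih, PySem.Dict.getD_modify, List.count_cons]
    by_cases hva : v = a <;> simp [hva] <;> omega

-- getD after A's per-distinct-flavor subtraction of the window counts
theorem pvGetD_subg_fold (l : List Int) (g : Int → Int) (d : PySem.Dict Int Int)
    (v : Int) (hnd : l.Nodup) :
    (l.foldl (fun d c => d.modify c 0 (fun w => w - g c)) d).getD v 0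
      = d.getD v 0 - (if v ∈ l then g v else 0) := by
  induction l generalizing d with
  | nil => simp
  | cons a t ih =>
    rcases List.nodup_cons.mp hnd with ⟨hat, hndt⟩
    simp only [List.foldl_cons, ih _ hndt, PySem.Dict.getD_modify, List.mem_cons]
    by_cases hva : v = a
    · subst hva; simp [hat]
    · simp [hva]

theorem pvUpdate_add (s acc : List Int) (a : Int) :
    PySem.Set.update s (PySem.Set.add acc a)
      = PySem.Set.add (PySem.Set.update s acc) a := by
  by_cases h : a ∈ acc
  · rw [PySem.Set.add_of_mem h,
        PySem.Set.add_of_mem ((PySem.Set.mem_update s acc a).mpr (Or.inr h))]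
  · have hadd : PySem.Set.add acc a = acc ++ [a] := by
      simp [PySem.Set.add, PySem.Set.contains, h]
    rw [hadd, PySem.Set.update_append]
    rfl

theorem pvUpdate_foldl_add (w : List Int) :
    ∀ (acc s : List Int), PySem.Set.update s (List.foldl PySem.Set.add acc w)
      = PySem.Set.update (PySem.Set.update s acc) w := by
  induction w with
  | nil => intro acc s; rfl
  | cons a t ih =>
    intro acc s
    show PySem.Set.update s (List.foldl PySem.Set.add (PySem.Set.add acc a) t)
      = PySem.Set.update (PySem.Set.update (PySem.Set.update s acc) [a]) t
    rw [ih, pvUpdate_add]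
    rfl

theorem pvUpdate_ofList (s w : List Int) :
    PySem.Set.update s (PySem.Set.ofList w) = PySem.Set.update s w := by
  rw [PySem.Set.ofList_eq_foldl, pvUpdate_foldl_add]
  rfl

-- A's subtraction of Counter(window).items() builds the very same dict as
-- an elementwise subtraction of the window
theorem pvPrefix_eq (d : PySem.Dict Int Int) (w : List Int) (hnd : d.keys.Nodup) :
    (PySem.Dict.counter w).items.foldl (fun d p => d.modify p.1 0 (· - p.2)) d
      = w.foldl (fun d c => d.modify c 0 (· - 1)) d := by
  have hitems : (PySem.Dict.counter w).items
      = (PySem.Set.ofList w).map (fun c => (c, (w.count c : Int))) :=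
    PySem.Dict.items_counter w
  have hfold : (PySem.Dict.counter w).items.foldl
      (fun d p => d.modify p.1 0 (· - p.2)) d
      = (PySem.Set.ofList w).foldl
          (fun d c => d.modify c 0 (fun v => v - (w.count c : Int))) d := by
    rw [hitems, List.foldl_map]
  have hkL : ((PySem.Set.ofList w).foldl
      (fun d c => d.modify c 0 (fun v => v - (w.count c : Int))) d).keys
      = PySem.Set.update d.keys w := by
    rw [PySem.Dict.keys_foldl_modify (f := fun _ c v => v - (w.count c : Int)),
        pvUpdate_ofList]
  have hkR : (w.foldl (fun d c => d.modify c 0 (· - 1)) d).keys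
      = PySem.Set.update d.keys w :=
    PySem.Dict.keys_foldl_modify w 0 (fun _ _ v => v - 1) d
  have hndU : (PySem.Set.update d.keys w).Nodup := PySem.Set.nodup_update _ _ hnd
  have hndL : ((PySem.Set.ofList w).foldl
      (fun d c => d.modify c 0 (fun v => v - (w.count c : Int))) d).keys.Nodup := by
    rw [hkL]; exact hndU
  have hndR : (w.foldl (fun d c => d.modify c 0 (· - 1)) d).keys.Nodup := by
    rw [hkR]; exact hndU
  rw [hfold]
  apply PySem.Dict.ext
  rw [PySem.Dict.items_eq_map_keys _ hndL 0, PySem.Dict.items_eq_map_keys _ hndR 0,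
      hkL, hkR]
  apply List.map_congr_left
  intro v _
  have hL := pvGetD_subg_fold (PySem.Set.ofList w) (fun c => (w.count c : Int)) d v
    (PySem.Set.nodup_ofList w)
  have hR := pvGetD_sub_fold w d v
  simp only [hL, hR, PySem.Set.mem_ofList]
  by_cases hvw : v ∈ w
  · simp [hvw]
  · simp [hvw, List.count_eq_zero_of_not_mem hvw]

-- how the leftover multiset changes when the window slides one step right
theorem pvRest_count (candies : List Int) (kk i : Nat) (v : Int)
    (h1 : 1 ≤ i) (h2 : i + kk ≤ candies.length) :
    ((pvRest candies kk i).count v : Int)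
      = ((pvRest candies kk (i - 1)).count v : Int)
        + (if candies.getD (i - 1) 0 = v then 1 else 0)
        - (if candies.getD (i - 1 + kk) 0 = v then 1 else 0) := by
  obtain ⟨j, rfl⟩ : ∃ j, i = j + 1 := ⟨i - 1, by omega⟩
  simp only [Nat.add_sub_cancel]
  have hlt1 : j < candies.length := by omega
  have hlt2 : j + kk < candies.length := by omega
  have htake : candies.take (j + 1) = candies.take j ++ [candies.getD j 0] := by
    rw [List.take_add_one, List.getElem?_eq_getElem hlt1, List.getD_eq_getElem _ _ hlt1]
    rfl
  have hdrop : candies.drop (j + kk)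
      = candies.getD (j + kk) 0 :: candies.drop (j + kk + 1) := by
    rw [List.drop_eq_getElem_cons hlt2, List.getD_eq_getElem _ _ hlt2]
  have harith : j + 1 + kk = j + kk + 1 := by omega
  unfold pvRest
  rw [harith, htake, hdrop]
  simp only [List.count_append, List.count_cons, List.count_nil, beq_iff_eq]
  push_cast
  split_ifs <;> omega

-- one slide step of A's total_freq dict, read through getD
theorem pvModify_getD (candies : List Int) (kk i : Nat) (tf : PySem.Dict Int Int)
    (a c v : Int)
    (hg : ∀ v, tf.getD v 0 = ((pvRest candies kk (i - 1)).count v : Int))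
    (hstepc : ((pvRest candies kk i).count v : Int)
      = ((pvRest candies kk (i - 1)).count v : Int)
        + (if a = v then 1 else 0) - (if c = v then 1 else 0)) :
    ((tf.modify a 0 (· + 1)).modify c 0 (· - 1)).getD v 0
      = ((pvRest candies kk i).count v : Int) := by
  rw [hstepc]
  simp only [PySem.Dict.getD_modify]
  rw [hg a, hg c, hg v]
  split_ifs <;> subst_vars <;> omega

-- A's loop, under the invariant, is a fold of max over pvF
theorem pvLoopA (candies : List Int) (k : Int) (kk : Nat) (hkk : k = (kk : Int)) :
    ∀ (t i : Nat), 1 ≤ i → i + t = candies.length - kk + 1 →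
    ∀ (wf tf : PySem.Dict Int Int) (b : Int),
    tf.keys = PySem.Set.ofList candies →
    (∀ v, tf.getD v 0 = ((pvRest candies kk (i - 1)).count v : Int)) →
    ((PySem.List.pyRange (i : Int) (((candies.length - kk : Nat) : Int) + 1) 1).foldl
        (pvStepA candies k) (wf, tf, b)).2.2
      = (List.range' i t).foldl (fun best j => max best (pvF candies kk j)) b := by
  intro t
  induction t with
  | zero =>
    intro i h1 ht wf tf b hkeys hg
    have : (i : Int) = ((candies.length - kk : Nat) : Int) + 1 := by
      omega
    rw [this, PySem.List.pyRange_one_eq_nil (le_refl _)]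
    simp [List.range']
  | succ t ih =>
    intro i h1 ht wf tf b hkeys hg
    have hiM : i ≤ candies.length - kk := by omega
    have hikN : i + kk ≤ candies.length := by omega
    have hlt : (i : Int) < ((candies.length - kk : Nat) : Int) + 1 := by
      omega
    rw [PySem.List.pyRange_one_cons hlt, List.foldl_cons]
    have hidx1 : (i : Int) - 1 = ((i - 1 : Nat) : Int) := by push_cast [h1]; ring
    have hidx2 : (i : Int) + k - 1 = ((i - 1 + kk : Nat) : Int) := by
      rw [hkk]
      push_cast [h1]
      ring
    have hstep : pvStepA candies k (wf, tf, b) (i : Int)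
        = ((wf.modify (candies.getD (i - 1) 0) 0 (· - 1)).modify
              (candies.getD (i - 1 + kk) 0) 0 (· + 1),
           (tf.modify (candies.getD (i - 1) 0) 0 (· + 1)).modify
              (candies.getD (i - 1 + kk) 0) 0 (· - 1),
           max b (pvCountPos ((tf.modify (candies.getD (i - 1) 0) 0 (· + 1)).modify
              (candies.getD (i - 1 + kk) 0) 0 (· - 1)))) := by
      simp only [pvStepA, hidx1, hidx2, PySem.List.pyGetD_natCast]
    rw [hstep]
    set a := candies.getD (i - 1) 0 with ha
    set c := candies.getD (i - 1 + kk) 0 with hc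
    set tf' := (tf.modify a 0 (· + 1)).modify c 0 (· - 1) with htf'
    have hamem : a ∈ candies := by
      rw [ha, List.getD_eq_getElem _ _ (by omega : i - 1 < candies.length)]
      exact List.getElem_mem _
    have hcmem : c ∈ candies := by
      rw [hc, List.getD_eq_getElem _ _ (by omega : i - 1 + kk < candies.length)]
      exact List.getElem_mem _
    have hkeys1 : (tf.modify a 0 (· + 1)).keys = PySem.Set.ofList candies := by
      rw [PySem.Dict.keys_modify, PySem.Dict.keys_insert_of_contains _ _
        ((PySem.Dict.contains_iff_mem_keys _ _).mpr
          (by rw [hkeys]; exact (PySem.Set.mem_ofList _ _).mpr hamem)), hkeys]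
    have hkeys' : tf'.keys = PySem.Set.ofList candies := by
      rw [htf', PySem.Dict.keys_modify, PySem.Dict.keys_insert_of_contains _ _
        ((PySem.Dict.contains_iff_mem_keys _ _).mpr
          (by rw [hkeys1]; exact (PySem.Set.mem_ofList _ _).mpr hcmem)), hkeys1]
    have hg' : ∀ v, tf'.getD v 0 = ((pvRest candies kk i).count v : Int) := by
      intro v
      have hstepc := pvRest_count candies kk i v h1 hikN
      rw [← ha, ← hc] at hstepc
      rw [htf']
      exact pvModify_getD candies kk i tf a c v hg hstepc
    have hu : pvCountPos tf' = pvF candies kk i :=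
      pvCountPos_of_inv candies kk i tf' hkeys' hg'
    rw [hu]
    have hnext : (i : Int) + 1 = ((i + 1 : Nat) : Int) := by push_cast; ring
    rw [hnext]
    rw [ih (i + 1) (by omega) (by omega) _ tf' (max b (pvF candies kk i))
      hkeys' (by simpa using hg')]
    rw [List.range'_succ, List.foldl_cons]

-- ===== VERDICT (by name: the statement is the Claim_ definition above) =====
theorem count_candy_flavors_spec : Claim_equal_count_candy_flavors := by
  unfold Claim_equal_count_candy_flavors Spec_count_candy_flavors Pre_count_candy_flavors
  intro candies k _ hpre
  obtain ⟨kk, hkk⟩ : ∃ kk : Nat, k = (kk : Int) := ⟨k.toNat, (Int.toNat_of_nonneg hpre).symm⟩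
  unfold count_candy_flavors count_candy_flavors_alt
  dsimp only
  -- ===== A side =====
  have hwindow : PySem.List.slice candies none (some k) = candies.take kk := by
    rw [hkk, PySem.List.slice_to_natCast]
  rw [hwindow, pvPrefix_eq _ _ (PySem.Dict.nodup_keys_counter candies)]
  set tf0 := (candies.take kk).foldl (fun d c => d.modify c 0 (· - 1))
    (PySem.Dict.counter candies) with htf0
  have hg0 : ∀ v, tf0.getD v 0 = ((pvRest candies kk 0).count v : Int) := by
    intro v
    rw [htf0, pvGetD_sub_fold, PySem.Dict.getD_counter]
    have hsplit : candies.count v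
        = (candies.take kk).count v + (candies.drop kk).count v := by
      conv_lhs => rw [← List.take_append_drop kk candies]
      exact List.count_append ..
    unfold pvRest
    simp only [List.take_zero, List.nil_append, Nat.zero_add]
    omega
  have hkeys0 : tf0.keys = PySem.Set.ofList candies := by
    rw [htf0, PySem.Dict.keys_foldl_modify, PySem.Dict.keys_counter]
    exact pvUpdate_of_subset _ _
      (fun x hx => (PySem.Set.mem_ofList _ _).mpr (List.mem_of_mem_take hx))
  have hu0 : pvCountPos tf0 = pvF candies kk 0 :=
    pvCountPos_of_inv candies kk 0 tf0 hkeys0 hg0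
  have hrangeA : PySem.List.pyRange 1 ((candies.length : Int) - k + 1) 1
      = PySem.List.pyRange 1 (((candies.length - kk : Nat) : Int) + 1) 1 := by
    by_cases hNk : kk ≤ candies.length
    · congr 1
      omega
    · rw [PySem.List.pyRange_one_eq_nil (by rw [hkk]; omega),
          PySem.List.pyRange_one_eq_nil (by omega)]
  have hloop := pvLoopA candies k kk hkk (candies.length - kk) 1 (le_refl _)
    (by omega) (PySem.Dict.counter (candies.take kk)) tf0 (pvF candies kk 0)
    hkeys0 (by simpa using hg0)
  rw [Nat.cast_one] at hloop
  rw [hrangeA, hu0, hloop]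
  -- ===== B side =====
  have hmax : max 0 ((candies.length : Int) - k)
      = ((candies.length - kk : Nat) : Int) := by
    rw [hkk]
    omega
  rw [hmax, PySem.List.pyRange_one]
  have htn : ((((candies.length - kk : Nat) : Int) + 1 - 0)).toNat
      = (candies.length - kk) + 1 := by omega
  rw [htn, List.foldl_map]
  have hbody : (fun (best : Int) (j : Nat) =>
        max best ((PySem.Set.ofList
          (PySem.List.slice candies none (some ((0 : Int) + (j : Int))) ++
           PySem.List.slice candies (some (((0 : Int) + (j : Int)) + k)) none)).length : Int))
      = fun best j => max best (pvF candies kk j) := by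
    funext best j
    have h1 : (0 : Int) + (j : Int) = ((j : Nat) : Int) := by ring
    have h2 : (j : Int) + k = ((j + kk : Nat) : Int) := by
      rw [hkk]
      push_cast
      ring
    rw [h1, h2, PySem.List.slice_to_natCast, PySem.List.slice_from_natCast]
    rfl
  rw [hbody, List.range_eq_range', List.range'_succ, List.foldl_cons,
    max_eq_right (by exact Int.natCast_nonneg _ : (0 : Int) ≤ pvF candies kk 0)]
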